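-- pv_equiv track=rewrite | github.com/katteq/data-structures | P0/Task4.py | find_markering_phones
-- ===== SOURCE A (Python) =====
-- def find_markering_phones(calls, texts):
--     telemarketers = {}
--     receivers = {}
--
--     for sender_text_phone, receiver_text_phone, _ in texts:
--         receivers[sender_text_phone] = sender_text_phone
--         receivers[receiver_text_phone] = receiver_text_phone
--
--     for sender_phone, receiver_phone, _, _ in calls:
--         receivers[receiver_phone] = receiver_phone
--         if telemarketers.get(receiver_phone) != None:
--             del telemarketers[receiver_phone]
--         if receivers.get(sender_phone) != None:
--             if  telemarketers.get(sender_phone) != None: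
--                 del telemarketers[sender_phone]
--         else:
--             telemarketers[sender_phone] = sender_phone
--
--     telemarketers_phones_list = list(telemarketers)
--     telemarketers_phones_list.sort()
--     return telemarketers_phones_list
-- ===== SOURCE B (Python) =====
-- def find_markering_phones(calls, texts):
--     text_participants = set()
--     for sender_text_phone, receiver_text_phone, _ in texts:
--         text_participants.add(sender_text_phone)
--         text_participants.add(receiver_text_phone)
--     call_receivers = {receiver for _, receiver, _, _ in calls}
--     call_senders = {sender for sender, _, _, _ in calls}
--     return sorted(call_senders - call_receivers - text_participants)
-- ===== Notes on version B (the rewrite author's own statement) =====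
-- stated objective: simpler
-- what changed: Replaced the interleaved dict add/delete maintenance over the calls loop with building three sets (text participants, call receivers, call senders) and returning sorted(call_senders - call_receivers - text_participants).
import Mathlib
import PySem

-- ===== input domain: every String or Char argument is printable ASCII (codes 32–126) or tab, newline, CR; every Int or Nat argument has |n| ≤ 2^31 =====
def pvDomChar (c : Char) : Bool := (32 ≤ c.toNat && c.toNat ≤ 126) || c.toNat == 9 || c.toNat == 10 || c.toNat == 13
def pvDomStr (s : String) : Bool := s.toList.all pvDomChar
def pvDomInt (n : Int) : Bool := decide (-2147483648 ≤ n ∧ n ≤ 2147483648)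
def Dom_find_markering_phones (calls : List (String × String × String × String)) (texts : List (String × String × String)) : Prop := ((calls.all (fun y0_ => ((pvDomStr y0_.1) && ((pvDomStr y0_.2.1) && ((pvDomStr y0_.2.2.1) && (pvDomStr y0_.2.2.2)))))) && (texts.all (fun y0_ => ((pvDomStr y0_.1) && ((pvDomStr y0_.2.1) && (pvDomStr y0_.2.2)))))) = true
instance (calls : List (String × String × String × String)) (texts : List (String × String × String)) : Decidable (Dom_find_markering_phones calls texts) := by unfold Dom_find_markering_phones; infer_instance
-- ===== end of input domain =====

-- B replaces A's interleaved dict add/delete maintenance by three sets and a set difference (objective: simpler).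

-- ===== PORT A =====
-- body of A's 'for … in calls' loop, step for step (branches in Python's order)
def pvStepA (st : PySem.Dict String String × PySem.Dict String String)
    (c : String × String × String × String) : PySem.Dict String String × PySem.Dict String String :=
  let sender_phone := c.1
  let receiver_phone := c.2.1
  let receivers := st.2.insert receiver_phone receiver_phone
  let telemarketers :=
    if st.1.get? receiver_phone ≠ none then st.1.erase receiver_phone else st.1
  let telemarketers :=
    if receivers.get? sender_phone ≠ none then
      (if telemarketers.get? sender_phone ≠ none then telemarketers.erase sender_phone
       else telemarketers)
    else telemarketers.insert sender_phone sender_phone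
  (telemarketers, receivers)

def find_markering_phones (calls : List (String × String × String × String)) (texts : List (String × String × String)) : List String :=
  let receivers := texts.foldl
    (fun (d : PySem.Dict String String) t => (d.insert t.1 t.1).insert t.2.1 t.2.1)
    PySem.Dict.empty
  let st := calls.foldl pvStepA (PySem.Dict.empty, receivers)
  PySem.List.sorted st.1.keys (fun x => x) false

-- ===== PORT B =====
def find_markering_phones_alt (calls : List (String × String × String × String)) (texts : List (String × String × String)) : List String :=
  let text_participants : PySem.Set String := texts.foldl
    (fun (s : PySem.Set String) t => PySem.Set.add (PySem.Set.add s t.1) t.2.1)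
    PySem.Set.empty
  let call_receivers : PySem.Set String := PySem.Set.ofList (calls.map (fun c => c.2.1))
  let call_senders : PySem.Set String := PySem.Set.ofList (calls.map (fun c => c.1))
  PySem.List.sorted (PySem.Set.diff (PySem.Set.diff call_senders call_receivers) text_participants)
    (fun x => x) false

-- ===== PRECONDITION & SPEC =====
def Spec_find_markering_phones (calls : List (String × String × String × String)) (texts : List (String × String × String)) (out : List String) : Prop := out = find_markering_phones_alt calls texts
instance (calls : List (String × String × String × String)) (texts : List (String × String × String)) (out : List String) : Decidable (Spec_find_markering_phones calls texts out) := by unfold Spec_find_markering_phones; infer_instance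

-- ===== CLAIM (what is proved, stated in full; the proofs are below) =====
def Claim_equal_find_markering_phones : Prop := ∀ (calls : List (String × String × String × String)) (texts : List (String × String × String)), Dom_find_markering_phones calls texts → Spec_find_markering_phones calls texts (find_markering_phones calls texts)

-- ===== LEMMAS AND PROOFS =====

-- keys of Dict.erase (erase is a filter on the items list)
theorem pv_keys_erase (d : PySem.Dict String String) (k : String) :
    (d.erase k).keys = d.keys.filter (fun x => !(x == k)) := by
  simp only [PySem.Dict.erase, PySem.Dict.keys]
  induction d.items with
  | nil => rfl
  | cons p t ih =>
    by_cases h : p.1 = k <;> simp [h, ih]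

theorem pv_mem_keys_erase (d : PySem.Dict String String) (k x : String) :
    x ∈ (d.erase k).keys ↔ x ∈ d.keys ∧ x ≠ k := by
  simp [pv_keys_erase]

theorem pv_nodup_keys_erase (d : PySem.Dict String String) (k : String)
    (h : d.keys.Nodup) : (d.erase k).keys.Nodup := by
  rw [pv_keys_erase]; exact h.filter _

-- membership in the telemarketers dict after one call step
theorem pv_stepA_mem_tm (st : PySem.Dict String String × PySem.Dict String String)
    (c : String × String × String × String) (x : String) :
    x ∈ (pvStepA st c).1.keys ↔
      (if c.1 ∈ st.2.keys ∨ c.1 = c.2.1 then x ∈ st.1.keys ∧ x ≠ c.2.1 ∧ x ≠ c.1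
       else (x ∈ st.1.keys ∧ x ≠ c.2.1) ∨ x = c.1) := by
  simp only [pvStepA]
  have hrec : ∀ y, ((st.2.insert c.2.1 c.2.1).get? y ≠ none) ↔ (y ∈ st.2.keys ∨ y = c.2.1) := by
    intro y
    rw [Ne, PySem.Dict.get?_eq_none_iff_not_mem_keys, not_not, PySem.Dict.mem_keys_insert]
    tauto
  by_cases hs : c.1 ∈ st.2.keys ∨ c.1 = c.2.1
  · rw [if_pos hs]
    rw [if_pos ((hrec c.1).mpr hs)]
    by_cases hr : st.1.get? c.2.1 ≠ none
    · rw [if_pos hr]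
      by_cases h2 : (st.1.erase c.2.1).get? c.1 ≠ none
      · rw [if_pos h2, pv_mem_keys_erase, pv_mem_keys_erase]
        tauto
      · rw [if_neg h2]
        rw [Ne, not_not, PySem.Dict.get?_eq_none_iff_not_mem_keys, pv_mem_keys_erase] at h2
        rw [pv_mem_keys_erase]
        constructor
        · rintro ⟨hm, hne⟩
          refine ⟨hm, hne, ?_⟩
          rintro rfl; exact h2 ⟨hm, hne⟩
        · tauto
    · rw [if_neg hr]
      rw [Ne, not_not, PySem.Dict.get?_eq_none_iff_not_mem_keys] at hr
      by_cases h2 : st.1.get? c.1 ≠ none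
      · rw [if_pos h2, pv_mem_keys_erase]
        constructor
        · rintro ⟨hm, hne⟩
          refine ⟨hm, ?_, hne⟩
          rintro rfl; exact hr hm
        · tauto
      · rw [if_neg h2]
        rw [Ne, not_not, PySem.Dict.get?_eq_none_iff_not_mem_keys] at h2
        constructor
        · intro hm
          exact ⟨hm, fun h => hr (h ▸ hm), fun h => h2 (h ▸ hm)⟩
        · tauto
  · rw [if_neg hs]
    rw [if_neg (by rw [hrec]; exact hs)]
    rw [not_or] at hs
    by_cases hr : st.1.get? c.2.1 ≠ none
    · rw [if_pos hr, PySem.Dict.mem_keys_insert, pv_mem_keys_erase]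
      tauto
    · rw [if_neg hr, PySem.Dict.mem_keys_insert]
      rw [Ne, not_not, PySem.Dict.get?_eq_none_iff_not_mem_keys] at hr
      constructor
      · rintro (rfl | hm)
        · right; rfl
        · left; exact ⟨hm, by rintro rfl; exact hr hm⟩
      · tauto

theorem pv_stepA_mem_rcv (st : PySem.Dict String String × PySem.Dict String String)
    (c : String × String × String × String) (x : String) :
    x ∈ (pvStepA st c).2.keys ↔ x ∈ st.2.keys ∨ x = c.2.1 := by
  simp only [pvStepA]
  rw [PySem.Dict.mem_keys_insert]
  tauto

theorem pv_stepA_nodup (st : PySem.Dict String String × PySem.Dict String String)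
    (c : String × String × String × String) (h : st.1.keys.Nodup) :
    (pvStepA st c).1.keys.Nodup := by
  simp only [pvStepA]
  split_ifs <;>
    first
      | exact pv_nodup_keys_erase _ _ (pv_nodup_keys_erase _ _ h)
      | exact pv_nodup_keys_erase _ _ h
      | exact PySem.Dict.nodup_keys_insert _ _ _ (pv_nodup_keys_erase _ _ h)
      | exact PySem.Dict.nodup_keys_insert _ _ _ h
      | exact h

-- invariant of A's calls loop: keys of telemarketers are exactly
-- (initial telemarketers ∪ senders) minus receivers-so-far minus receivers-to-come
theorem pv_loopA_char (cs : List (String × String × String × String)) :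
    ∀ (tm rcv : PySem.Dict String String), tm.keys.Nodup →
      (∀ y ∈ tm.keys, y ∉ rcv.keys) →
      (cs.foldl pvStepA (tm, rcv)).1.keys.Nodup ∧
      ∀ x, x ∈ (cs.foldl pvStepA (tm, rcv)).1.keys ↔
        ((x ∈ tm.keys ∨ x ∈ cs.map (fun c => c.1)) ∧ x ∉ rcv.keys ∧
          x ∉ cs.map (fun c => c.2.1)) := by
  induction cs with
  | nil =>
    intro tm rcv htm hdis
    refine ⟨htm, fun x => ?_⟩
    simp only [List.foldl_nil, List.map_nil, List.not_mem_nil, or_false, not_false_iff, and_true]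
    exact ⟨fun h => ⟨h, hdis x h⟩, fun h => h.1⟩
  | cons c cs ih =>
    intro tm rcv htm hdis
    simp only [List.foldl_cons]
    have htm' : (pvStepA (tm, rcv) c).1.keys.Nodup := pv_stepA_nodup _ _ htm
    have hdis' : ∀ y ∈ (pvStepA (tm, rcv) c).1.keys, y ∉ (pvStepA (tm, rcv) c).2.keys := by
      intro y hy hz
      rw [pv_stepA_mem_rcv] at hz
      rw [pv_stepA_mem_tm] at hy
      split_ifs at hy with hb
      · rcases hz with hz | rfl
        · exact hdis y hy.1 hz
        · exact hy.2.1 rfl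
      · rcases hy with ⟨hm, hne⟩ | rfl
        · rcases hz with hz | rfl
          · exact hdis y hm hz
          · exact hne rfl
        · rw [not_or] at hb
          rcases hz with hz | h2
          · exact hb.1 hz
          · exact hb.2 h2
    obtain ⟨hnd, hmem⟩ := ih (pvStepA (tm, rcv) c).1 (pvStepA (tm, rcv) c).2 htm' hdis'
    refine ⟨hnd, fun x => ?_⟩
    rw [hmem x, pv_stepA_mem_tm, pv_stepA_mem_rcv]
    simp only [List.map_cons, List.mem_cons]
    by_cases hb : c.1 ∈ rcv.keys ∨ c.1 = c.2.1
    · rw [if_pos hb]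
      by_cases h1 : x = c.1 <;> by_cases h2 : x = c.2.1 <;> simp_all
    · rw [if_neg hb]
      by_cases h1 : x = c.1 <;> by_cases h2 : x = c.2.1 <;> simp_all

-- keys of the receivers dict built from texts
theorem pv_text_dict (texts : List (String × String × String)) :
    ∀ (d : PySem.Dict String String) (x : String),
      x ∈ (texts.foldl (fun (d : PySem.Dict String String) t =>
          (d.insert t.1 t.1).insert t.2.1 t.2.1) d).keys ↔
        x ∈ d.keys ∨ ∃ t ∈ texts, x = t.1 ∨ x = t.2.1 := by
  induction texts with
  | nil => intro d x; simp
  | cons t ts ih =>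
    intro d x
    simp only [List.foldl_cons, ih, PySem.Dict.mem_keys_insert, List.mem_cons]
    constructor
    · rintro ((rfl | (rfl | h)) | ⟨u, hu, h⟩)
      · exact Or.inr ⟨t, Or.inl rfl, Or.inr rfl⟩
      · exact Or.inr ⟨t, Or.inl rfl, Or.inl rfl⟩
      · exact Or.inl h
      · exact Or.inr ⟨u, Or.inr hu, h⟩
    · rintro (h | ⟨u, (rfl | hu), h⟩)
      · exact Or.inl (Or.inr (Or.inr h))
      · rcases h with rfl | rfl
        · exact Or.inl (Or.inr (Or.inl rfl))
        · exact Or.inl (Or.inl rfl)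
      · exact Or.inr ⟨u, hu, h⟩

-- membership in the text-participants set built by B
theorem pv_text_set (texts : List (String × String × String)) :
    ∀ (s : PySem.Set String) (x : String),
      x ∈ texts.foldl (fun (s : PySem.Set String) t =>
          PySem.Set.add (PySem.Set.add s t.1) t.2.1) s ↔
        x ∈ s ∨ ∃ t ∈ texts, x = t.1 ∨ x = t.2.1 := by
  induction texts with
  | nil => intro s x; simp
  | cons t ts ih =>
    intro s x
    simp only [List.foldl_cons, ih, PySem.Set.mem_add, List.mem_cons]
    constructor
    · rintro (((h | rfl) | rfl) | ⟨u, hu, h⟩)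
      · exact Or.inl h
      · exact Or.inr ⟨t, Or.inl rfl, Or.inl rfl⟩
      · exact Or.inr ⟨t, Or.inl rfl, Or.inr rfl⟩
      · exact Or.inr ⟨u, Or.inr hu, h⟩
    · rintro (h | ⟨u, (rfl | hu), h⟩)
      · exact Or.inl (Or.inl (Or.inl h))
      · rcases h with rfl | rfl
        · exact Or.inl (Or.inl (Or.inr rfl))
        · exact Or.inl (Or.inr rfl)
      · exact Or.inr ⟨u, hu, h⟩

-- ===== VERDICT (by name: the statement is the Claim_ definition above) =====
theorem find_markering_phones_spec : Claim_equal_find_markering_phones := by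
  intro calls texts _
  show find_markering_phones calls texts = find_markering_phones_alt calls texts
  unfold find_markering_phones find_markering_phones_alt
  obtain ⟨hndA, hmemA⟩ := pv_loopA_char calls PySem.Dict.empty
    (texts.foldl (fun (d : PySem.Dict String String) t =>
      (d.insert t.1 t.1).insert t.2.1 t.2.1) PySem.Dict.empty)
    (by simp [PySem.Dict.keys, PySem.Dict.empty])
    (by intro y hy; simp [PySem.Dict.keys, PySem.Dict.empty] at hy)
  have hndB : (PySem.Set.diff (PySem.Set.diff
      (PySem.Set.ofList (calls.map (fun c => c.1)))
      (PySem.Set.ofList (calls.map (fun c => c.2.1))))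
      (texts.foldl (fun (s : PySem.Set String) t =>
        PySem.Set.add (PySem.Set.add s t.1) t.2.1) PySem.Set.empty)).Nodup :=
    PySem.Set.nodup_diff _ _ (PySem.Set.nodup_diff _ _ (PySem.Set.nodup_ofList _))
  refine PySem.List.sorted_eq_sorted_of_perm _ _ (fun x => x) (fun _ _ h => h) ?_
  refine (List.perm_ext_iff_of_nodup hndA hndB).mpr fun x => ?_
  rw [hmemA x, PySem.Set.mem_diff, PySem.Set.mem_diff, PySem.Set.mem_ofList,
    PySem.Set.mem_ofList, pv_text_set, pv_text_dict]
  simp [PySem.Dict.keys, PySem.Dict.empty, PySem.Set.empty]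
  tauto
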